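-- pv_equiv track=rewrite | github.com/Sam9682/tatool-xlsx | app_classes/excel_graphs_data.py | get_account_details_dict
-- ===== SOURCE A (Python) =====
-- def get_account_details_dict(file_in_list):
--     account_details_dict = {}
--     for line in file_in_list:
--         account_display_name = line.split(",")[2]
--         status_check = line.split(",")[4]
--         check_name = line.split(",")[5]
--         if account_details_dict.get(account_display_name) == None:
--             account_details_dict[account_display_name] = {}
--         if account_details_dict.get(account_display_name, {}).get(check_name) == None:
--             account_details_dict[account_display_name][check_name] = {}
--         if account_details_dict.get(account_display_name, {}).get(check_name, {}).get(status_check) == None: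
--             account_details_dict[account_display_name][check_name][status_check] = 1
--         else:
--             a = account_details_dict.get(account_display_name, {}).get(check_name, {}).get(status_check)
--             account_details_dict[account_display_name][check_name][status_check] = a + 1
--     return account_details_dict
-- ===== SOURCE B (Python) =====
-- def get_account_details_dict(file_in_list):
--     counts = {}
--     for line in file_in_list:
--         parts = line.split(",")
--         key = (parts[2], parts[5], parts[4])
--         counts[key] = counts.get(key, 0) + 1
--     result = {}
--     for (name, check, status), cnt in counts.items():
--         result.setdefault(name, {}).setdefault(check, {})[status] = cnt
--     return result
-- ===== Notes on version B (the rewrite author's own statement) =====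
-- stated objective: alternative
-- what changed: Replaced A's one-pass branch-and-init aggregation into a nested dict by a two-stage computation: a first pass counts a flat dict keyed by the (account, check, status) triple, and a second pass reshapes those counts into the nested dict.
import Mathlib
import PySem

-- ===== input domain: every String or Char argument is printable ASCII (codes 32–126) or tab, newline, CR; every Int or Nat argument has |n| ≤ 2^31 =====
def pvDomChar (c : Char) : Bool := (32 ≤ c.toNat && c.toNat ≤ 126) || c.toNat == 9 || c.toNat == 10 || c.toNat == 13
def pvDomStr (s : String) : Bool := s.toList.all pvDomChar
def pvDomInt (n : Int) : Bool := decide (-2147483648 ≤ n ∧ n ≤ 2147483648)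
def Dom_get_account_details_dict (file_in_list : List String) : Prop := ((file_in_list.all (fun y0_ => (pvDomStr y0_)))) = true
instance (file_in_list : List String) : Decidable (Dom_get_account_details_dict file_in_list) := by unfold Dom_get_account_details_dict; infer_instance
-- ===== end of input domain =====

-- B replaces A's one-pass branch-and-init nested aggregation by a two-stage computation
-- (flat count keyed by the (account, check, status) triple, then reshape into the nested
-- dict); same cost, alternative structure. Equivalence is about the return value.

-- line.split(",") — the separator is the non-empty literal ",", so split? is always `some`
def pvSplit (line : String) : List String := (PySem.Str.split? line ",").getD []

-- ===== PORT A =====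
-- Python A raises IndexError on a line with fewer than 6 comma-separated fields;
-- those inputs are excluded by Pre_ below, the port skips such a line.
def pvAStep (d : PySem.Dict String (PySem.Dict String (PySem.Dict String Int))) (line : String) :
    PySem.Dict String (PySem.Dict String (PySem.Dict String Int)) :=
  match PySem.List.pyGet? (pvSplit line) 2 with
  | none => d
  | some account_display_name =>
  match PySem.List.pyGet? (pvSplit line) 4 with
  | none => d
  | some status_check =>
  match PySem.List.pyGet? (pvSplit line) 5 with
  | none => d
  | some check_name =>
    let d1 := if (d.get? account_display_name).isNone then d.insert account_display_name PySem.Dict.empty else d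
    let d2 := if ((d1.getD account_display_name PySem.Dict.empty).get? check_name).isNone
              then d1.insert account_display_name ((d1.getD account_display_name PySem.Dict.empty).insert check_name PySem.Dict.empty)
              else d1
    match ((d2.getD account_display_name PySem.Dict.empty).getD check_name PySem.Dict.empty).get? status_check with
    | none =>
        d2.insert account_display_name
          ((d2.getD account_display_name PySem.Dict.empty).insert check_name
            (((d2.getD account_display_name PySem.Dict.empty).getD check_name PySem.Dict.empty).insert status_check 1))
    | some a =>
        d2.insert account_display_name
          ((d2.getD account_display_name PySem.Dict.empty).insert check_name
            (((d2.getD account_display_name PySem.Dict.empty).getD check_name PySem.Dict.empty).insert status_check (a + 1)))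

def get_account_details_dict (file_in_list : List String) : List (String × List (String × List (String × Int))) :=
  (file_in_list.foldl pvAStep PySem.Dict.empty).items.map
    (fun p => (p.1, p.2.items.map (fun q => (q.1, q.2.items))))

-- ===== PORT B =====
-- key = (parts[2], parts[5], parts[4]); Python B raises IndexError on a short line,
-- exactly where A does (excluded by Pre_); the port skips such a line.
def pvKeyB (line : String) : Option (String × String × String) :=
  let parts := pvSplit line
  match PySem.List.pyGet? parts 2, PySem.List.pyGet? parts 5, PySem.List.pyGet? parts 4 with
  | some name, some check, some status => some (name, check, status)
  | _, _, _ => none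

-- counts[key] = counts.get(key, 0) + 1
def pvBump (c : PySem.Dict (String × String × String) Int) (line : String) :
    PySem.Dict (String × String × String) Int :=
  match pvKeyB line with
  | none => c
  | some key => c.insert key (c.getD key 0 + 1)

-- result.setdefault(name, {}).setdefault(check, {})[status] = cnt
def pvRStep (d : PySem.Dict String (PySem.Dict String (PySem.Dict String Int)))
    (p : (String × String × String) × Int) :
    PySem.Dict String (PySem.Dict String (PySem.Dict String Int)) :=
  let name := p.1.1
  let check := p.1.2.1
  let status := p.1.2.2
  let cnt := p.2
  let d1 := if (d.get? name).isNone then d.insert name PySem.Dict.empty else d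
  let m1 := d1.getD name PySem.Dict.empty
  let m2 := if (m1.get? check).isNone then m1.insert check PySem.Dict.empty else m1
  d1.insert name (m2.insert check ((m2.getD check PySem.Dict.empty).insert status cnt))

def get_account_details_dict_alt (file_in_list : List String) : List (String × List (String × List (String × Int))) :=
  let counts := file_in_list.foldl pvBump PySem.Dict.empty
  let result := counts.items.foldl pvRStep PySem.Dict.empty
  result.items.map (fun p => (p.1, p.2.items.map (fun q => (q.1, q.2.items))))

-- ===== PRECONDITION & SPEC =====
-- Pre_ excludes exactly the lines with fewer than 6 comma-separated fields, on which
-- Python A (and Python B) raises IndexError.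
def Pre_get_account_details_dict (file_in_list : List String) : Prop :=
  ∀ line ∈ file_in_list, 6 ≤ (pvSplit line).length
instance (file_in_list : List String) : Decidable (Pre_get_account_details_dict file_in_list) := by
  unfold Pre_get_account_details_dict; infer_instance
def pvWitness_get_account_details_dict : List String :=
  ["1,2,acct,x,OK,check1", "1,2,acct,x,NOK,check1,extra"]

def Spec_get_account_details_dict (file_in_list : List String) (out : List (String × List (String × List (String × Int)))) : Prop := out = get_account_details_dict_alt file_in_list
instance (file_in_list : List String) (out : List (String × List (String × List (String × Int)))) : Decidable (Spec_get_account_details_dict file_in_list out) := by unfold Spec_get_account_details_dict; infer_instance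

-- ===== CLAIM (what is proved, stated in full; the proofs are below) =====
def Claim_equal_get_account_details_dict : Prop := ∀ (file_in_list : List String), Dom_get_account_details_dict file_in_list → Pre_get_account_details_dict file_in_list → Spec_get_account_details_dict file_in_list (get_account_details_dict file_in_list)

-- ===== LEMMAS AND PROOFS =====

-- the common "set the count of triple k to w" updater both steps collapse to
def pvSet (d : PySem.Dict String (PySem.Dict String (PySem.Dict String Int)))
    (k : String × String × String) (w : Int) :
    PySem.Dict String (PySem.Dict String (PySem.Dict String Int)) :=
  d.insert k.1 ((d.getD k.1 PySem.Dict.empty).insert k.2.1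
    (((d.getD k.1 PySem.Dict.empty).getD k.2.1 PySem.Dict.empty).insert k.2.2 w))

-- three-level lookup of a triple's count
def pvL3 (d : PySem.Dict String (PySem.Dict String (PySem.Dict String Int)))
    (k : String × String × String) : Option Int :=
  ((d.getD k.1 PySem.Dict.empty).getD k.2.1 PySem.Dict.empty).get? k.2.2

theorem pv_insert_comm {ν : Type} (d : PySem.Dict String ν) (a b : String) (u v : ν)
    (hab : a ≠ b) (ha : d.contains a = true) :
    (d.insert a u).insert b v = (d.insert b v).insert a u := by
  apply PySem.Dict.ext
  have hca : (d.insert b v).contains a = true := by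
    rw [PySem.Dict.contains_insert]; simp [ha]
  by_cases hb : d.contains b = true
  · have hcb : (d.insert a u).contains b = true := by
      rw [PySem.Dict.contains_insert]; simp [hb]
    rw [PySem.Dict.items_insert_of_contains _ _ hcb,
        PySem.Dict.items_insert_of_contains _ _ ha,
        PySem.Dict.items_insert_of_contains _ _ hca,
        PySem.Dict.items_insert_of_contains _ _ hb]
    rw [List.map_map, List.map_map]
    apply List.map_congr_left
    intro p _
    by_cases h1 : p.1 = a <;> by_cases h2 : p.1 = b <;>
      simp_all [Function.comp, Ne.symm hab]
  · have hb' : d.contains b = false := by simpa using hb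
    have hcb : (d.insert a u).contains b = false := by
      rw [PySem.Dict.contains_insert]; simp [hb', Ne.symm hab]
    rw [PySem.Dict.items_insert_of_not_contains _ _ hcb,
        PySem.Dict.items_insert_of_contains _ _ ha,
        PySem.Dict.items_insert_of_contains _ _ hca,
        PySem.Dict.items_insert_of_not_contains _ _ hb']
    rw [List.map_append]
    simp [Ne.symm hab]

theorem pvRStep_eq (d : PySem.Dict String (PySem.Dict String (PySem.Dict String Int)))
    (p : (String × String × String) × Int) : pvRStep d p = pvSet d p.1 p.2 := by
  obtain ⟨⟨n, ch, st⟩, w⟩ := p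
  unfold pvRStep pvSet
  simp only
  by_cases h1 : (d.get? n).isNone
  · have hd : d.getD n PySem.Dict.empty = PySem.Dict.empty :=
      PySem.Dict.getD_of_get?_eq_none _ _ (by simpa [Option.isNone_iff_eq_none] using h1)
    simp [h1, hd, PySem.Dict.getD_insert_self, PySem.Dict.get?_empty, PySem.Dict.getD_empty,
      PySem.Dict.insert_insert_self]
  · simp only [h1, Bool.false_eq_true, if_false]
    by_cases h2 : ((d.getD n PySem.Dict.empty).get? ch).isNone
    · have hm : (d.getD n PySem.Dict.empty).getD ch PySem.Dict.empty = PySem.Dict.empty :=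
        PySem.Dict.getD_of_get?_eq_none _ _ (by simpa [Option.isNone_iff_eq_none] using h2)
      simp [h2, hm, PySem.Dict.getD_insert_self, PySem.Dict.insert_insert_self]
    · simp [h2]

theorem pvAStep_eq (d : PySem.Dict String (PySem.Dict String (PySem.Dict String Int))) (line : String) :
    pvAStep d line =
      match pvKeyB line with
      | none => d
      | some k => pvSet d k (match pvL3 d k with | none => 1 | some a => a + 1) := by
  unfold pvAStep pvKeyB
  cases hg2 : PySem.List.pyGet? (pvSplit line) 2 with
  | none => simp [hg2]
  | some n =>
  cases hg4 : PySem.List.pyGet? (pvSplit line) 4 with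
  | none => simp [hg2, hg4]
  | some st =>
  cases hg5 : PySem.List.pyGet? (pvSplit line) 5 with
  | none => simp [hg2, hg4, hg5]
  | some ch =>
  simp only [hg2, hg4, hg5]
  simp only [pvSet, pvL3]
  by_cases h1 : (d.get? n).isNone
  · have hd : d.getD n PySem.Dict.empty = PySem.Dict.empty :=
      PySem.Dict.getD_of_get?_eq_none _ _ (by simpa [Option.isNone_iff_eq_none] using h1)
    simp [h1, hd, PySem.Dict.getD_insert_self, PySem.Dict.get?_empty, PySem.Dict.getD_empty,
      PySem.Dict.insert_insert_self]
  · simp only [h1, Bool.false_eq_true, if_false]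
    by_cases h2 : ((d.getD n PySem.Dict.empty).get? ch).isNone
    · have hm : (d.getD n PySem.Dict.empty).getD ch PySem.Dict.empty = PySem.Dict.empty :=
        PySem.Dict.getD_of_get?_eq_none _ _ (by simpa [Option.isNone_iff_eq_none] using h2)
      simp [h2, hm, PySem.Dict.getD_insert_self, PySem.Dict.get?_empty,
        PySem.Dict.insert_insert_self]
    · simp only [h2, Bool.false_eq_true, if_false]
      cases ((d.getD n PySem.Dict.empty).getD ch PySem.Dict.empty).get? st <;> simp

theorem pvL3_empty (k : String × String × String) : pvL3 PySem.Dict.empty k = none := by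
  simp [pvL3, PySem.Dict.getD_empty, PySem.Dict.get?_empty]

theorem pvL3_set_self (d : PySem.Dict String (PySem.Dict String (PySem.Dict String Int)))
    (k : String × String × String) (w : Int) : pvL3 (pvSet d k w) k = some w := by
  simp [pvL3, pvSet, PySem.Dict.getD_insert_self, PySem.Dict.get?_insert_self]

theorem pvL3_set_ne (d : PySem.Dict String (PySem.Dict String (PySem.Dict String Int)))
    (k k' : String × String × String) (w : Int) (h : k' ≠ k) :
    pvL3 (pvSet d k w) k' = pvL3 d k' := by
  obtain ⟨n, ch, st⟩ := k
  obtain ⟨n', ch', st'⟩ := k'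
  simp only [pvL3, pvSet]
  by_cases h1 : n' = n
  · subst h1
    rw [PySem.Dict.getD_insert_self]
    by_cases h2 : ch' = ch
    · subst h2
      rw [PySem.Dict.getD_insert_self]
      have h3 : st' ≠ st := by simpa using h
      rw [PySem.Dict.get?_insert_of_ne _ _ h3]
    · rw [PySem.Dict.getD_insert_of_ne _ _ _ h2]
  · rw [PySem.Dict.getD_insert_of_ne _ _ _ h1]

theorem pvSet_set (d : PySem.Dict String (PySem.Dict String (PySem.Dict String Int)))
    (k : String × String × String) (v w : Int) : pvSet (pvSet d k v) k w = pvSet d k w := by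
  simp [pvSet, PySem.Dict.getD_insert_self, PySem.Dict.insert_insert_self]

theorem pvL3_some_contains (d : PySem.Dict String (PySem.Dict String (PySem.Dict String Int)))
    (k : String × String × String) (a : Int) (h : pvL3 d k = some a) :
    d.contains k.1 = true ∧ (d.getD k.1 PySem.Dict.empty).contains k.2.1 = true ∧
      ((d.getD k.1 PySem.Dict.empty).getD k.2.1 PySem.Dict.empty).contains k.2.2 = true := by
  simp only [pvL3] at h
  have h3 : ((d.getD k.1 PySem.Dict.empty).getD k.2.1 PySem.Dict.empty).contains k.2.2 = true := by
    rw [PySem.Dict.contains_eq_isSome_get?, h]; rfl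
  have h2 : (d.getD k.1 PySem.Dict.empty).contains k.2.1 = true := by
    by_contra hc
    have he : (d.getD k.1 PySem.Dict.empty).getD k.2.1 PySem.Dict.empty = PySem.Dict.empty :=
      PySem.Dict.getD_of_not_contains _ _ (by simpa using hc)
    rw [he, PySem.Dict.get?_empty] at h; exact absurd h (by simp)
  have h1 : d.contains k.1 = true := by
    by_contra hc
    have he : d.getD k.1 PySem.Dict.empty = PySem.Dict.empty :=
      PySem.Dict.getD_of_not_contains _ _ (by simpa using hc)
    rw [he, PySem.Dict.getD_empty, PySem.Dict.get?_empty] at h; exact absurd h (by simp)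
  exact ⟨h1, h2, h3⟩

theorem pvSet_comm (d : PySem.Dict String (PySem.Dict String (PySem.Dict String Int)))
    (k k' : String × String × String) (w v : Int) (hne : k' ≠ k) (a : Int) (ha : pvL3 d k = some a) :
    pvSet (pvSet d k w) k' v = pvSet (pvSet d k' v) k w := by
  obtain ⟨hcn, hcc, hcs⟩ := pvL3_some_contains d k a ha
  obtain ⟨n, ch, st⟩ := k
  obtain ⟨n', ch', st'⟩ := k'
  simp only at hcn hcc hcs
  simp only [pvSet]
  by_cases h1 : n' = n
  · subst h1
    simp only [PySem.Dict.getD_insert_self, PySem.Dict.insert_insert_self]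
    by_cases h2 : ch' = ch
    · subst h2
      simp only [PySem.Dict.getD_insert_self, PySem.Dict.insert_insert_self]
      have h3 : st ≠ st' := fun e => hne (by simp [e])
      exact congrArg _ (congrArg _ (pv_insert_comm _ st st' w v h3 hcs))
    · simp only [PySem.Dict.getD_insert_of_ne _ _ _ h2,
        PySem.Dict.getD_insert_of_ne _ _ _ (Ne.symm h2)]
      exact congrArg _ (pv_insert_comm _ ch ch' _ _ (Ne.symm h2) hcc)
  · simp only [PySem.Dict.getD_insert_of_ne _ _ _ h1,
      PySem.Dict.getD_insert_of_ne _ _ _ (Ne.symm h1)]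
    exact pv_insert_comm d n n' _ _ (Ne.symm h1) hcn

theorem pvL3_foldl_absent (items : List ((String × String × String) × Int))
    (d : PySem.Dict String (PySem.Dict String (PySem.Dict String Int)))
    (k : String × String × String) (h : ∀ p ∈ items, p.1 ≠ k) :
    pvL3 (List.foldl pvRStep d items) k = pvL3 d k := by
  induction items generalizing d with
  | nil => rfl
  | cons p rest ih =>
    rw [List.foldl_cons, ih _ (fun q hq => h q (List.mem_cons_of_mem _ hq)),
      pvRStep_eq, pvL3_set_ne]
    exact Ne.symm (h p (List.mem_cons_self))

theorem pvL3_foldl_present (items : List ((String × String × String) × Int))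
    (d : PySem.Dict String (PySem.Dict String (PySem.Dict String Int)))
    (k : String × String × String) (v : Int) (hnd : (items.map Prod.fst).Nodup)
    (hmem : (k, v) ∈ items) : pvL3 (List.foldl pvRStep d items) k = some v := by
  induction items generalizing d with
  | nil => exact absurd hmem (List.not_mem_nil)
  | cons p rest ih =>
    rw [List.map_cons, List.nodup_cons] at hnd
    rcases List.mem_cons.mp hmem with he | hm
    · subst he
      rw [List.foldl_cons, pvL3_foldl_absent rest _ k
        (fun q hq hqe => by
          have hm1 : q.1 ∈ rest.map Prod.fst := List.mem_map_of_mem hq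
          rw [hqe] at hm1
          exact hnd.1 hm1),
        pvRStep_eq, pvL3_set_self]
    · rw [List.foldl_cons]
      exact ih _ hnd.2 hm

theorem pvSet_foldl_comm (items : List ((String × String × String) × Int))
    (D : PySem.Dict String (PySem.Dict String (PySem.Dict String Int)))
    (k : String × String × String) (w : Int) (hs : (pvL3 D k).isSome)
    (h : ∀ p ∈ items, p.1 ≠ k) :
    List.foldl pvRStep (pvSet D k w) items = pvSet (List.foldl pvRStep D items) k w := by
  induction items generalizing D with
  | nil => rfl
  | cons p rest ih =>
    obtain ⟨a, ha⟩ := Option.isSome_iff_exists.mp hs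
    rw [List.foldl_cons, List.foldl_cons, pvRStep_eq, pvRStep_eq,
      pvSet_comm _ _ _ _ _ (fun e => h p (List.mem_cons_self) e) a ha]
    exact ih _ (by rw [pvL3_set_ne D p.1 k p.2 (Ne.symm (h p List.mem_cons_self)), ha]; rfl)
      (fun q hq => h q (List.mem_cons_of_mem _ hq))

theorem pvFoldl_replace (items : List ((String × String × String) × Int))
    (d : PySem.Dict String (PySem.Dict String (PySem.Dict String Int)))
    (k : String × String × String) (w : Int) (hnd : (items.map Prod.fst).Nodup)
    (hmem : k ∈ items.map Prod.fst) :
    List.foldl pvRStep d (items.map (fun p => if p.1 == k then (k, w) else p)) =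
      pvSet (List.foldl pvRStep d items) k w := by
  induction items generalizing d with
  | nil => exact absurd hmem (by simp)
  | cons p rest ih =>
    rw [List.map_cons, List.nodup_cons] at hnd
    by_cases hp : p.1 = k
    · have hrest : ∀ q ∈ rest, q.1 ≠ k := fun q hq hqe => by
        have hm1 : q.1 ∈ rest.map Prod.fst := List.mem_map_of_mem hq
        rw [hqe, ← hp] at hm1
        exact hnd.1 hm1
      have hmap : rest.map (fun p => if p.1 == k then (k, w) else p) = rest := by
        have h1 : rest.map (fun p => if p.1 == k then (k, w) else p) = rest.map id :=
          List.map_congr_left (fun q hq => by simp [hrest q hq])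
        simpa using h1
      rw [List.map_cons, List.foldl_cons, List.foldl_cons, hmap]
      simp only [hp, beq_self_eq_true, if_true]
      have h1 : pvRStep d (k, w) = pvSet (pvRStep d p) k w := by
        rw [pvRStep_eq, pvRStep_eq, hp, pvSet_set]
      rw [h1, pvSet_foldl_comm rest _ k w
        (by rw [pvRStep_eq, hp, pvL3_set_self]; rfl) hrest]
    · have hmem' : k ∈ rest.map (fun p => p.1) := by
        rcases List.mem_map.mp hmem with ⟨q, hq, hqe⟩
        rcases List.mem_cons.mp hq with he | hm
        · exact absurd (he ▸ hqe) hp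
        · have hm1 : q.1 ∈ rest.map (fun p => p.1) := List.mem_map_of_mem hm
          rwa [hqe] at hm1
      rw [List.map_cons, List.foldl_cons, List.foldl_cons]
      have hif : (if (p.1 == k) = true then (k, w) else p) = p := if_neg (by simp [hp])
      rw [hif]
      exact ih _ hnd.2 hmem'

theorem pvBump_nodup (xs : List String) (c : PySem.Dict (String × String × String) Int)
    (h : c.keys.Nodup) : (List.foldl pvBump c xs).keys.Nodup := by
  induction xs generalizing c with
  | nil => exact h
  | cons x rest ih =>
    rw [List.foldl_cons]
    apply ih
    unfold pvBump
    cases pvKeyB x with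
    | none => exact h
    | some k => exact PySem.Dict.nodup_keys_insert _ _ _ h

theorem pvMain (xs : List String) :
    List.foldl pvAStep PySem.Dict.empty xs =
      List.foldl pvRStep PySem.Dict.empty (List.foldl pvBump PySem.Dict.empty xs).items := by
  induction xs using List.reverseRecOn with
  | nil => rfl
  | append_singleton xs x ih =>
    rw [List.foldl_append, List.foldl_append, List.foldl_cons, List.foldl_nil,
      List.foldl_cons, List.foldl_nil, pvAStep_eq, ih]
    set C := List.foldl pvBump PySem.Dict.empty xs with hC
    have hnd : C.keys.Nodup := pvBump_nodup xs _ PySem.Dict.nodup_keys_empty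
    have hndi : (C.items.map (fun p => p.1)).Nodup := by
      simpa only [PySem.Dict.keys] using hnd
    cases hk : pvKeyB x with
    | none => simp only [pvBump, hk]
    | some k =>
      simp only [pvBump, hk]
      by_cases hc : C.contains k = true
      · obtain ⟨v, hv⟩ := Option.isSome_iff_exists.mp
          (PySem.Dict.contains_eq_isSome_get? C k ▸ hc)
        have hgd : C.getD k 0 = v := PySem.Dict.getD_of_get?_eq_some _ _ hv
        have hmemk : k ∈ C.items.map (fun p => p.1) := by
          have := (PySem.Dict.contains_iff_mem_keys C k).mp hc
          simpa only [PySem.Dict.keys] using this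
        rw [PySem.Dict.items_insert_of_contains _ _ hc,
          pvFoldl_replace _ _ _ _ hndi hmemk,
          pvL3_foldl_present _ _ _ v hndi (PySem.Dict.mem_items_of_get?_eq_some _ hv),
          hgd]
      · have hc' : C.contains k = false := by simpa using hc
        have habs : ∀ p ∈ C.items, p.1 ≠ k := by
          intro p hp hpe
          exact absurd ((PySem.Dict.contains_iff_mem_keys C k).mpr
            (by simpa only [PySem.Dict.keys] using hpe ▸ List.mem_map_of_mem hp)) (by simp [hc'])
        rw [PySem.Dict.items_insert_of_not_contains _ _ hc',
          List.foldl_append, List.foldl_cons, List.foldl_nil,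
          pvL3_foldl_absent _ _ _ habs, pvL3_empty, pvRStep_eq,
          PySem.Dict.getD_of_not_contains _ _ hc']
        norm_num

-- ===== VERDICT (by name: the statement is the Claim_ definition above) =====
theorem get_account_details_dict_spec : Claim_equal_get_account_details_dict := by
  intro xs _ _
  unfold Spec_get_account_details_dict get_account_details_dict get_account_details_dict_alt
  rw [pvMain]
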